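-- pv_equiv track=rewrite | github.com/dongyang2/hello-world | image_processing/homework2/homework2.py | change_dir
-- ===== SOURCE A (Python) =====
-- def change_dir(dr, st):
--     tmp_s = dr.split('/')
--     s = ''
--     for ii, i in enumerate(tmp_s):
--         if ii == len(tmp_s)-1:
--             s += st
--         else:
--             s += i+'/'
--     return s
-- ===== SOURCE B (Python) =====
-- def change_dir(dr, st):
--     idx = dr.rfind('/')
--     if idx == -1:
--         return st
--     return dr[:idx + 1] + st
-- ===== Notes on version B (the rewrite author's own statement) =====
-- stated objective: idiomatic
-- what changed: B locates only the last '/' with rfind and concatenates the prefix with the replacement, instead of splitting the whole path into components and rebuilding it in an index-checking loop.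
import Mathlib
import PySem

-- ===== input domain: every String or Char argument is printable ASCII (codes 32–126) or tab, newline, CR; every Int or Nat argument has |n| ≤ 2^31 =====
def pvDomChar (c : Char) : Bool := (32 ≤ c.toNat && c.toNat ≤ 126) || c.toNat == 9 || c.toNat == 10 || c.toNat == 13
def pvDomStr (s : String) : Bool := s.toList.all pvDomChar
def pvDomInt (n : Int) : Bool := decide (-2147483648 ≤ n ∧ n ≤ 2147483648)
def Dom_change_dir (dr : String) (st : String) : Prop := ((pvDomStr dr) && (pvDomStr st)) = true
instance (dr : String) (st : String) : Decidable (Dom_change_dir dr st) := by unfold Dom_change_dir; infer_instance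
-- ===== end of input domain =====

-- B replaces A's full split + index-checking rebuild loop by locating only the last '/' (rfind)
-- and concatenating the prefix with the replacement; objective: more idiomatic, same cost.

-- ===== PORT A =====
def change_dir (dr : String) (st : String) : String :=
  let tmp_s := PySem.Chars.splitOn dr.toList ['/']
  let s := (PySem.List.enumerate tmp_s).foldl
    (fun s p => if p.1 == (tmp_s.length : Int) - 1 then s ++ st.toList else s ++ p.2 ++ ['/'])
    ([] : List Char)
  String.ofList s

-- ===== PORT B =====
def change_dir_alt (dr : String) (st : String) : String :=
  let idx := PySem.Chars.rfind dr.toList ['/']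
  if idx == -1 then st
  else String.ofList (PySem.Chars.slice dr.toList none (some (idx + 1)) ++ st.toList)

-- ===== PRECONDITION & SPEC =====
def Spec_change_dir (dr : String) (st : String) (out : String) : Prop := out = change_dir_alt dr st
instance (dr : String) (st : String) (out : String) : Decidable (Spec_change_dir dr st out) := by unfold Spec_change_dir; infer_instance

-- ===== CLAIM (what is proved, stated in full; the proofs are below) =====
def Claim_equal_change_dir : Prop := ∀ (dr : String) (st : String), Dom_change_dir dr st → Spec_change_dir dr st (change_dir dr st)

-- ===== LEMMAS AND PROOFS =====

/-- Proof-side mirror of `splitOn.go` for the one-character separator `'/'`. -/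
def splitAux : List Char → List Char → List (List Char)
  | [], cur => [cur.reverse]
  | c :: rest, cur => if c = '/' then cur.reverse :: splitAux rest [] else splitAux rest (c :: cur)

/-- Prefix of `cs` up to and including its last `'/'` (meaningful when `'/' ∈ cs`). -/
def pref : List Char → List Char
  | [] => []
  | c :: cs => if '/' ∈ cs then c :: pref cs else [c]

/-- What A's loop prepends before `st`: each non-last component followed by `'/'`. -/
def Fparts (parts : List (List Char)) : List Char := parts.dropLast.flatMap (· ++ ['/'])

lemma splitAux_ne_nil (l cur : List Char) : splitAux l cur ≠ [] := by
  induction l generalizing cur with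
  | nil => simp [splitAux]
  | cons c rest ih => simp only [splitAux]; split_ifs <;> simp [ih]

lemma isPrefixOf_slash (l : List Char) : ['/'].isPrefixOf l = true ↔ l[0]? = some '/' := by
  cases l with
  | nil => simp [List.isPrefixOf]
  | cons c rest =>
    simp only [List.isPrefixOf, List.getElem?_cons_zero, Option.some.injEq, Bool.and_true]
    rw [beq_iff_eq]
    exact ⟨fun h => h ▸ rfl, fun h => h.symm⟩

lemma go_fuel_nil (cur : List Char) (acc : List (List Char)) (fuel : Nat) :
    PySem.Chars.splitOn.go ['/'] (fuel + 1) [] cur acc = (cur.reverse :: acc).reverse := by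
  rw [PySem.Chars.splitOn.go]
  simp

lemma go_zero_nil (cur : List Char) (acc : List (List Char)) :
    PySem.Chars.splitOn.go ['/'] 0 [] cur acc = ((cur.reverse ++ []) :: acc).reverse := by
  rw [PySem.Chars.splitOn.go]

lemma go_slash (cur : List Char) (acc : List (List Char)) (fuel : Nat) (rest : List Char) :
    PySem.Chars.splitOn.go ['/'] (fuel + 1) ('/' :: rest) cur acc
      = PySem.Chars.splitOn.go ['/'] fuel rest [] (cur.reverse :: acc) := by
  rw [PySem.Chars.splitOn.go]
  simp [List.isPrefixOf]

lemma go_other (cur : List Char) (acc : List (List Char)) (fuel : Nat) (c : Char)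
    (h : c ≠ '/') (rest : List Char) :
    PySem.Chars.splitOn.go ['/'] (fuel + 1) (c :: rest) cur acc
      = PySem.Chars.splitOn.go ['/'] fuel rest (c :: cur) acc := by
  rw [PySem.Chars.splitOn.go]
  simp [List.isPrefixOf]
  intro hdc; exact absurd hdc.symm h

lemma splitOn_go_eq (fuel : Nat) : ∀ (l cur : List Char) (acc : List (List Char)),
    l.length ≤ fuel →
    PySem.Chars.splitOn.go ['/'] fuel l cur acc = acc.reverse ++ splitAux l cur := by
  induction fuel with
  | zero =>
    intro l cur acc h
    have hl : l = [] := by cases l <;> simp_all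
    subst hl
    rw [go_zero_nil]
    simp [splitAux]
  | succ fuel ih =>
    intro l cur acc h
    cases l with
    | nil => rw [go_fuel_nil]; simp [splitAux]
    | cons c rest =>
      by_cases hc : c = '/'
      · subst hc
        rw [go_slash, ih rest [] _ (by simp at h; omega)]
        simp [splitAux]
      · rw [go_other _ _ _ _ hc, ih rest (c :: cur) _ (by simp at h; omega)]
        simp [splitAux, hc]

lemma splitOn_eq (cs : List Char) :
    PySem.Chars.splitOn cs ['/'] = splitAux cs [] := by
  rw [PySem.Chars.splitOn, splitOn_go_eq (cs.length + 1) cs [] [] (by omega)]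
  simp

lemma Fparts_cons (a : List Char) (l : List (List Char)) (h : l ≠ []) :
    Fparts (a :: l) = a ++ ['/'] ++ Fparts l := by
  simp [Fparts, List.dropLast_cons_of_ne_nil h]

lemma Fparts_splitAux (l : List Char) : ∀ cur,
    Fparts (splitAux l cur) = if '/' ∈ l then cur.reverse ++ pref l else [] := by
  induction l with
  | nil => intro cur; simp [splitAux, Fparts]
  | cons c rest ih =>
    intro cur
    by_cases hc : c = '/'
    · subst hc
      rw [show splitAux ('/' :: rest) cur = cur.reverse :: splitAux rest [] by simp [splitAux]]
      rw [Fparts_cons _ _ (splitAux_ne_nil rest []), ih []]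
      by_cases hm : '/' ∈ rest <;> simp [pref, hm]
    · rw [show splitAux (c :: rest) cur = splitAux rest (c :: cur) by simp [splitAux, hc]]
      rw [ih (c :: cur)]
      have hmem : ('/' ∈ c :: rest) = ('/' ∈ rest) := by
        simp [List.mem_cons, Ne.symm hc]
      by_cases hm : '/' ∈ rest
      · simp [hm, hmem, pref]
      · simp [hm, hmem]

/-- A's loop over the enumerated non-last components. -/
lemma fold_front (C : Int) (st' : List Char) (ps : List (List Char)) :
    ∀ (n : Int) (acc : List Char), n + ps.length ≤ C →
    (PySem.List.enumerate ps n).foldl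
      (fun s p => if p.1 == C then s ++ st' else s ++ p.2 ++ ['/']) acc
      = acc ++ ps.flatMap (· ++ ['/']) := by
  induction ps with
  | nil => intro n acc h; simp [PySem.List.enumerate_nil]
  | cons q t ih =>
    intro n acc h
    rw [PySem.List.enumerate_cons, List.foldl_cons]
    have hne : (n == C) = false := by
      simp only [List.length_cons] at h
      simp only [beq_eq_false_iff_ne]
      push_cast at h
      omega
    rw [hne]
    simp only [Bool.false_eq_true, if_false]
    rw [ih (n + 1) _ (by simp only [List.length_cons] at h; push_cast at h ⊢; omega)]
    simp

/-- rfind.go's result: either -1 and no slash up to j, or the greatest slash index ≤ j. -/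
lemma rfind_go_spec (s : List Char) : ∀ j : Nat,
    (PySem.Chars.rfind.go s ['/'] j = -1 ∧ ∀ i, i ≤ j → s[i]? ≠ some '/') ∨
    (∃ k : Nat, PySem.Chars.rfind.go s ['/'] j = (k : Int) ∧ k ≤ j ∧ s[k]? = some '/' ∧
      ∀ i, k < i → i ≤ j → s[i]? ≠ some '/') := by
  intro j
  induction j with
  | zero =>
    rw [PySem.Chars.rfind.go]
    by_cases h : ['/'].isPrefixOf s = true
    · right; exact ⟨0, by simp [h], le_refl 0, (isPrefixOf_slash s).mp h, by omega⟩
    · left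
      refine ⟨by simp [h], ?_⟩
      intro i hi
      interval_cases i
      exact fun hc => h ((isPrefixOf_slash s).mpr hc)
  | succ j ih =>
    rw [PySem.Chars.rfind.go]
    by_cases h : ['/'].isPrefixOf (s.drop (j + 1)) = true
    · right
      refine ⟨j + 1, by simp [h], le_refl _, ?_, by omega⟩
      have := (isPrefixOf_slash _).mp h
      simpa [List.getElem?_drop] using this
    · have hnot : s[j + 1]? ≠ some '/' := by
        intro hcontra
        apply h
        rw [isPrefixOf_slash]
        simpa [List.getElem?_drop] using hcontra
      rcases ih with ⟨heq, hall⟩ | ⟨k, heq, hk, hsl, hall⟩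
      · left
        refine ⟨by simp [h, heq], ?_⟩
        intro i hi
        rcases Nat.lt_or_ge i (j + 1) with hlt | hge
        · exact hall i (by omega)
        · have : i = j + 1 := by omega
          subst this; exact hnot
      · right
        refine ⟨k, by simp [h, heq], by omega, hsl, ?_⟩
        intro i hki hi
        rcases Nat.lt_or_ge i (j + 1) with hlt | hge
        · exact hall i hki (by omega)
        · have : i = j + 1 := by omega
          subst this; exact hnot

lemma take_eq_pref (cs : List Char) : ∀ k : Nat, cs[k]? = some '/' →
    (∀ i, k < i → cs[i]? ≠ some '/') → cs.take (k + 1) = pref cs := by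
  induction cs with
  | nil => intro k h; simp at h
  | cons c rest ih =>
    intro k hk hall
    cases k with
    | zero =>
      simp only [List.getElem?_cons_zero, Option.some.injEq] at hk
      subst hk
      have hnm : '/' ∉ rest := by
        intro hm
        obtain ⟨i, hi, hgi⟩ := List.getElem_of_mem hm
        exact hall (i + 1) (by omega) (by simpa [hgi] using List.getElem?_eq_getElem hi)
      simp [pref, hnm]
    | succ k =>
      simp only [List.getElem?_cons_succ] at hk
      have hm : '/' ∈ rest := List.mem_of_getElem? hk
      have ht : rest.take (k + 1) = pref rest := by
        apply ih k hk
        intro i hki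
        have := hall (i + 1) (by omega)
        simpa using this
      simp [pref, hm, ht]

lemma no_slash_of_forall (cs : List Char) (h : ∀ i, i ≤ cs.length → cs[i]? ≠ some '/') :
    '/' ∉ cs := by
  intro hm
  obtain ⟨i, hi, hgi⟩ := List.getElem_of_mem hm
  exact h i (by omega) (by simpa [hgi] using List.getElem?_eq_getElem hi)

/-- A's whole loop computes `Fparts parts ++ st'`. -/
lemma fold_whole (parts : List (List Char)) (st' : List Char) (hne : parts ≠ []) :
    (PySem.List.enumerate parts).foldl
      (fun s p => if p.1 == (parts.length : Int) - 1 then s ++ st' else s ++ p.2 ++ ['/'])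
      ([] : List Char) = Fparts parts ++ st' := by
  obtain ⟨ps, p, hps⟩ : ∃ ps p, parts = ps ++ [p] := by
    refine ⟨parts.dropLast, parts.getLast hne, ?_⟩
    exact (List.dropLast_concat_getLast hne).symm
  subst hps
  have hC : ((ps ++ [p]).length : Int) - 1 = (ps.length : Int) := by
    simp
  rw [show PySem.List.enumerate (ps ++ [p]) = PySem.List.enumerate ps 0 ++ PySem.List.enumerate [p] (0 + ps.length) from PySem.List.enumerate_append ps [p] 0]
  rw [List.foldl_append]
  rw [fold_front _ _ _ 0 _ (by rw [hC]; omega)]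
  rw [PySem.List.enumerate_cons, PySem.List.enumerate_nil, List.foldl_cons, List.foldl_nil]
  have : ((0 + (ps.length : Int)) == ((ps ++ [p]).length : Int) - 1) = true := by
    rw [hC]; simp
  rw [this]
  simp [Fparts]

-- ===== VERDICT (by name: the statement is the Claim_ definition above) =====
theorem change_dir_spec : Claim_equal_change_dir := by
  intro dr st _
  unfold Spec_change_dir change_dir change_dir_alt
  simp only []
  rw [splitOn_eq, fold_whole _ _ (splitAux_ne_nil _ _), Fparts_splitAux _ []]
  rw [show PySem.Chars.rfind dr.toList ['/'] = PySem.Chars.rfind.go dr.toList ['/'] dr.toList.length from rfl]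
  rcases rfind_go_spec dr.toList dr.toList.length with ⟨heq, hall⟩ | ⟨k, heq, hk, hsl, hall⟩
  · have hnm : '/' ∉ dr.toList := no_slash_of_forall _ hall
    rw [heq]
    simp [hnm, String.ofList_toList]
  · have hm : '/' ∈ dr.toList := List.mem_of_getElem? hsl
    rw [heq]
    have hbeq : (((k : Int)) == (-1 : Int)) = false := by
      simp only [beq_eq_false_iff_ne]
      omega
    rw [hbeq]
    simp only [Bool.false_eq_true, if_false, hm, if_pos, List.reverse_nil, List.nil_append]
    have hsl2 : PySem.Chars.slice dr.toList none (some ((k : Int) + 1)) = dr.toList.take (k + 1) := by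
      rw [PySem.Chars.slice_eq_listSlice, PySem.List.slice_to dr.toList (by omega : (0:Int) ≤ (k:Int) + 1)]
      norm_num
    have hall2 : ∀ i, k < i → dr.toList[i]? ≠ some '/' := by
      intro i hki
      rcases Nat.lt_or_ge (dr.toList.length) i with hlt | hge
      · simp [List.getElem?_eq_none (by omega : dr.toList.length ≤ i)]
      · exact hall i hki hge
    rw [hsl2, take_eq_pref dr.toList k hsl hall2]
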